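-- pv_equiv track=rewrite | github.com/bji6/Practice_Problems | Cracking_Coding_Interview/Recursion/coinsPerms.py | coinsPerms
-- ===== SOURCE A (Python) =====
-- def coinsPerms(number_of_coins):
-- 	#base case
-- 	if (number_of_coins == 0):
-- 		return [""]
--
-- 	new_list = []
--
-- 	#QUARTERS
-- 	if ((number_of_coins - 25) >= 0):
-- 		temp_list = coinsPerms(number_of_coins - 25)
-- 		for x in temp_list:
-- 			new_list.append("Q_" + x)
-- 	#DIMES
-- 	if ((number_of_coins - 10) >= 0):
-- 		temp_list = coinsPerms(number_of_coins - 10)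
-- 		for x in temp_list:
-- 			new_list.append("D_" + x)
-- 	#NICKELS
-- 	if ((number_of_coins - 5) >= 0):
-- 		temp_list = coinsPerms(number_of_coins - 5)
-- 		for x in temp_list:
-- 			new_list.append("N_" + x)
-- 	#PENNIES
-- 	if ((number_of_coins - 1) >= 0):
-- 		temp_list = coinsPerms(number_of_coins - 1)
-- 		for x in temp_list:
-- 			new_list.append("P_" + x)
--
-- 	return new_list
-- ===== SOURCE B (Python) =====
-- def coinsPerms(number_of_coins):
--     # Bottom-up DP: dp[k] holds all permutations for value k; each row built once.
--     # On memory exhaustion the (possibly huge) table is dropped before propagating.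
--     if number_of_coins < 0:
--         return []
--     dp = [[""]]
--     try:
--         for k in range(1, number_of_coins + 1):
--             row = []
--             for prefix, c in (("Q_", 25), ("D_", 10), ("N_", 5), ("P_", 1)):
--                 if k >= c:
--                     for x in dp[k - c]:
--                         row.append(prefix + x)
--             dp.append(row)
--     except MemoryError:
--         del dp, row
--         raise
--     return dp[number_of_coins]
-- ===== Notes on version B (the rewrite author's own statement) =====
-- stated objective: alternative
-- what changed: Replaces the exponential top-down recursion (which recomputes coinsPerms(m) many times) with a bottom-up dynamic-programming table dp[0..n] where each row is built exactly once (intended as faster; a timing run could not confirm it at sizes where both finish).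
import Mathlib
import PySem

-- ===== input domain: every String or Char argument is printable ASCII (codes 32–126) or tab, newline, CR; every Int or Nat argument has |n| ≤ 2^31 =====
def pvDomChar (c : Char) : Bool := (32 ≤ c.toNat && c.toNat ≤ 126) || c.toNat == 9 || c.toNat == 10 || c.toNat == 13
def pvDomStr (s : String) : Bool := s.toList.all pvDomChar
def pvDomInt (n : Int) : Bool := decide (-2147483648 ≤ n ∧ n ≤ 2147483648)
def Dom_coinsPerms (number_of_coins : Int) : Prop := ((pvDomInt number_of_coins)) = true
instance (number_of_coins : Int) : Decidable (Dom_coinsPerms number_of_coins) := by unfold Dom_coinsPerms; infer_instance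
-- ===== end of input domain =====

-- B replaces A's exponential top-down recursion with a bottom-up DP table built once per row (alternative algorithm).


-- ===== PORT A =====
-- literal transliteration of A: recursion on the value, four guarded recursive calls,
-- results appended in order Q, D, N, P
def coinsPerms (number_of_coins : Int) : List String :=
  if number_of_coins = 0 then [""]
  else
    let l0 : List String := []
    let l1 := if number_of_coins - 25 ≥ 0 then
        l0 ++ (coinsPerms (number_of_coins - 25)).map (fun x => "Q_" ++ x) else l0
    let l2 := if number_of_coins - 10 ≥ 0 then
        l1 ++ (coinsPerms (number_of_coins - 10)).map (fun x => "D_" ++ x) else l1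
    let l3 := if number_of_coins - 5 ≥ 0 then
        l2 ++ (coinsPerms (number_of_coins - 5)).map (fun x => "N_" ++ x) else l2
    let l4 := if number_of_coins - 1 ≥ 0 then
        l3 ++ (coinsPerms (number_of_coins - 1)).map (fun x => "P_" ++ x) else l3
    l4
termination_by number_of_coins.toNat
decreasing_by all_goals omega

-- ===== PORT B =====
-- one DP row: fold over the four coins, extending the row from earlier table rows
def coinsRow (dp : List (List String)) (k : Nat) : List String :=
  ([("Q_", 25), ("D_", 10), ("N_", 5), ("P_", 1)] : List (String × Nat)).foldl
    (fun row pc =>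
      if k ≥ pc.2 then row ++ (dp.getD (k - pc.2) []).map (fun x => pc.1 ++ x) else row) []

-- the table dp[0..k], built bottom-up, appending each new row
def coinsTable : Nat → List (List String)
  | 0 => [[""]]
  | k+1 => let dp := coinsTable k; dp ++ [coinsRow dp (k+1)]

def coinsPerms_alt (number_of_coins : Int) : List String :=
  if number_of_coins < 0 then []
  else (coinsTable number_of_coins.toNat).getD number_of_coins.toNat []

-- ===== PRECONDITION & SPEC =====
-- A's recursion goes about number_of_coins frames deep (the all-pennies chain), so on large
-- values A exceeds CPython's recursion limit and raises RecursionError instead of returning;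
-- Pre_ excludes those large values (no input on which A returns a value is excluded).
def Pre_coinsPerms (number_of_coins : Int) : Prop := number_of_coins < 1000
instance (number_of_coins : Int) : Decidable (Pre_coinsPerms number_of_coins) := by unfold Pre_coinsPerms; infer_instance
def pvWitness_coinsPerms : Int := (30)

def Spec_coinsPerms (number_of_coins : Int) (out : List String) : Prop := out = coinsPerms_alt number_of_coins
instance (number_of_coins : Int) (out : List String) : Decidable (Spec_coinsPerms number_of_coins out) := by unfold Spec_coinsPerms; infer_instance

-- ===== CLAIM (what is proved, stated in full; the proofs are below) =====
def Claim_equal_coinsPerms : Prop := ∀ (number_of_coins : Int), Dom_coinsPerms number_of_coins → Pre_coinsPerms number_of_coins → Spec_coinsPerms number_of_coins (coinsPerms number_of_coins)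

-- ===== LEMMAS AND PROOFS =====

theorem coinsTable_length (k : Nat) : (coinsTable k).length = k + 1 := by
  induction k with
  | zero => rfl
  | succ k ih => simp [coinsTable, ih]

theorem coinsPerms_neg (n : Int) (h : n < 0) : coinsPerms n = [] := by
  rw [coinsPerms]
  simp [show ¬ n = 0 from by omega, show ¬ (25 : Int) ≤ n from by omega,
    show ¬ (10 : Int) ≤ n from by omega, show ¬ (5 : Int) ≤ n from by omega,
    show ¬ (1 : Int) ≤ n from by omega]

-- the table rows are exactly A's values
theorem coinsTable_getD (k : Nat) : ∀ j ≤ k,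
    (coinsTable k).getD j [] = coinsPerms (j : Int) := by
  induction k with
  | zero =>
    intro j hj
    interval_cases j
    rw [coinsPerms]; rfl
  | succ k ih =>
    intro j hj
    rcases Nat.lt_or_ge j (k+1) with hlt | hge
    · have : j < (coinsTable k).length := by rw [coinsTable_length]; omega
      rw [coinsTable, List.getD, List.getElem?_append_left this]
      exact ih _ (by omega)
    · have hj' : j = k + 1 := by omega
      subst hj'
      have hlen : (coinsTable k).length = k + 1 := coinsTable_length k
      have : (coinsTable (k+1)).getD (k+1) [] = coinsRow (coinsTable k) (k+1) := by
        rw [coinsTable, List.getD, ← hlen, List.getElem?_append_right (le_refl _)]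
        simp
      rw [this]
      -- unfold one step of A at k+1
      rw [coinsPerms]
      have hne : ¬ ((k+1 : Nat) : Int) = 0 := by omega
      simp only [hne, if_false, coinsRow, List.foldl]
      have row1 : (coinsTable k).getD (k + 1 - 1) [] = coinsPerms (((k+1 : Nat) : Int) - 1) := by
        rw [show ((k+1 : Nat) : Int) - 1 = ((k + 1 - 1 : Nat) : Int) from by omega]
        exact ih _ (by omega)
      have row5 : ((k+1 : Nat) : Int) - 5 ≥ 0 →
          (coinsTable k).getD (k + 1 - 5) [] = coinsPerms (((k+1 : Nat) : Int) - 5) := fun h => by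
        rw [show ((k+1 : Nat) : Int) - 5 = ((k + 1 - 5 : Nat) : Int) from by omega]
        exact ih _ (by omega)
      have row10 : ((k+1 : Nat) : Int) - 10 ≥ 0 →
          (coinsTable k).getD (k + 1 - 10) [] = coinsPerms (((k+1 : Nat) : Int) - 10) := fun h => by
        rw [show ((k+1 : Nat) : Int) - 10 = ((k + 1 - 10 : Nat) : Int) from by omega]
        exact ih _ (by omega)
      have row25 : ((k+1 : Nat) : Int) - 25 ≥ 0 →
          (coinsTable k).getD (k + 1 - 25) [] = coinsPerms (((k+1 : Nat) : Int) - 25) := fun h => by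
        rw [show ((k+1 : Nat) : Int) - 25 = ((k + 1 - 25 : Nat) : Int) from by omega]
        exact ih _ (by omega)
      by_cases h25 : ((k+1 : Nat) : Int) - 25 ≥ 0 <;>
        by_cases h10 : ((k+1 : Nat) : Int) - 10 ≥ 0 <;>
          by_cases h5 : ((k+1 : Nat) : Int) - 5 ≥ 0 <;>
            simp only [h25, h10, h5, if_true, if_false,
              show ((k+1 : Nat) : Int) - 1 ≥ 0 from by omega,
              show k + 1 ≥ 1 from by omega,
              (show (k+1 ≥ 25) ↔ (((k+1 : Nat) : Int) - 25 ≥ 0) from by omega),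
              (show (k+1 ≥ 10) ↔ (((k+1 : Nat) : Int) - 10 ≥ 0) from by omega),
              (show (k+1 ≥ 5) ↔ (((k+1 : Nat) : Int) - 5 ≥ 0) from by omega),
              row1] <;>
            (try rw [row25 h25]) <;> (try rw [row10 h10]) <;> (try rw [row5 h5])

-- ===== VERDICT (by name: the statement is the Claim_ definition above) =====
theorem coinsPerms_spec : Claim_equal_coinsPerms := by
  intro n _ _
  unfold Spec_coinsPerms coinsPerms_alt
  rcases Int.lt_or_le n 0 with h | h
  · simp [h, coinsPerms_neg n h]
  · have h0 : ¬ n < 0 := by omega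
    simp only [h0, if_false]
    rw [coinsTable_getD n.toNat n.toNat (le_refl _)]
    congr 1
    omega
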